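-- pv_equiv track=rewrite | github.com/laurenjack/variance-min-classification | src/d_dim_problem.py | analytic_segmentations
-- ===== SOURCE A (Python) =====
-- import math
--
-- def analytic_segmentations(n, d):
--     mid = (n + 1) // 2
--     count = 0
--     for k in range(mid):
--         count += math.comb(n, min(k, d - 1))
--     count *= 2
--     if n % 2 == 0:
--         count += math.comb(n, min(mid, d - 1))
--     return count
-- ===== SOURCE B (Python) =====
-- def analytic_segmentations(n, d):
--     mid = (n + 1) // 2
--     cap = d - 1
--     m = min(mid, cap)
--     count = 0
--     c = 1  # comb(n, 0); maintained as comb(n, k) incrementally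
--     for k in range(m):
--         count += c
--         c = c * (n - k) // (k + 1)
--     if mid > cap:
--         count += (mid - cap) * c  # all terms with k >= cap equal comb(n, cap)
--     count *= 2
--     if n % 2 == 0:
--         count += c  # c == comb(n, min(mid, cap)) here
--     return count
-- ===== Notes on version B (the rewrite author's own statement) =====
-- stated objective: faster
-- what changed: B replaces A's O(n) calls to math.comb by a single incremental binomial recurrence over the first min(mid, d-1) indices and collapses the constant tail (k >= d-1, where min caps the index) into one multiply (mid - (d-1)) * comb(n, d-1), so B does O(min(n, d)) arithmetic steps instead of O(n) comb evaluations.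
-- outside the precondition, e.g. on analytic_segmentations(-3, -1): A returns 0, B returns 2; on analytic_segmentations(-9, -4): A returns 0, B returns 2
import Mathlib
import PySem

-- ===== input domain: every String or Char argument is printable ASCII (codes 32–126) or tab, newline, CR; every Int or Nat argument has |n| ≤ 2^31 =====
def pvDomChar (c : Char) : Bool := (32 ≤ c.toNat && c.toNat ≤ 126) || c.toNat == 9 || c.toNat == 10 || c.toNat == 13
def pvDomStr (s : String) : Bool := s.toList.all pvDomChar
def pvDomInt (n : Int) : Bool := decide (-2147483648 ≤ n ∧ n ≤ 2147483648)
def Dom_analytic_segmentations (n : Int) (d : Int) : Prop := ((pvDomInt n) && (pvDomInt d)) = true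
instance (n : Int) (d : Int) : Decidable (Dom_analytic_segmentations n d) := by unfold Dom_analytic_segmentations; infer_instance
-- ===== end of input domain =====

-- B replaces A's per-term math.comb calls by one incremental binomial recurrence plus a single
-- multiply for the constant tail (k ≥ d-1): O(min(n,d)) arithmetic steps instead of O(n) comb calls.

-- ===== PORT A =====
-- math.comb n k: raises ValueError on a negative argument (those calls are excluded by Pre_);
-- for 0 ≤ k, 0 ≤ n it equals Nat.choose (0 when k > n), which is exact.
def pycomb (n k : Int) : Int := if 0 ≤ n ∧ 0 ≤ k then (n.toNat.choose k.toNat : Int) else 0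

def analytic_segmentations (n : Int) (d : Int) : Int :=
  let mid := PySem.Int.floordiv (n + 1) 2
  let count := (PySem.List.pyRange 0 mid 1).foldl (fun count k => count + pycomb n (min k (d - 1))) 0
  let count := count * 2
  if PySem.Int.mod n 2 = 0 then count + pycomb n (min mid (d - 1)) else count

-- ===== PORT B =====
def analytic_segmentations_alt (n : Int) (d : Int) : Int :=
  let mid := PySem.Int.floordiv (n + 1) 2
  let cap := d - 1
  let m := min mid cap
  let p := (PySem.List.pyRange 0 m 1).foldl
      (fun (p : Int × Int) k => (p.1 + p.2, PySem.Int.floordiv (p.2 * (n - k)) (k + 1))) (0, 1)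
  let count := if mid > cap then p.1 + (mid - cap) * p.2 else p.1
  let count := count * 2
  if PySem.Int.mod n 2 = 0 then count + p.2 else count

-- ===== PRECONDITION & SPEC =====
-- Pre_ restricts to the natural binomial domain: d ≥ 1 and (n ≥ 0 or n odd).  For d ≤ 0 math.comb
-- raises ValueError whenever a term is evaluated; the only excluded inputs where A still returns
-- (negative odd n with d ≤ 0, value 0 from an empty loop) are outside that domain and B's tail
-- multiply does not reproduce them.
def Pre_analytic_segmentations (n : Int) (d : Int) : Prop := 1 ≤ d ∧ (0 ≤ n ∨ n % 2 = 1)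
instance (n : Int) (d : Int) : Decidable (Pre_analytic_segmentations n d) := by
  unfold Pre_analytic_segmentations; infer_instance

def pvWitness_analytic_segmentations : Int × Int := (7, 3)

def Spec_analytic_segmentations (n : Int) (d : Int) (out : Int) : Prop := out = analytic_segmentations_alt n d
instance (n : Int) (d : Int) (out : Int) : Decidable (Spec_analytic_segmentations n d out) := by unfold Spec_analytic_segmentations; infer_instance

-- ===== CLAIM (what is proved, stated in full; the proofs are below) =====
def Claim_equal_analytic_segmentations : Prop := ∀ (n : Int) (d : Int), Dom_analytic_segmentations n d → Pre_analytic_segmentations n d → Spec_analytic_segmentations n d (analytic_segmentations n d)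

-- ===== LEMMAS AND PROOFS =====

lemma choose_step (N t : Nat) :
    PySem.Int.floordiv ((N.choose t : Int) * ((N : Int) - (t : Int))) ((t : Int) + 1)
      = (N.choose (t + 1) : Int) := by
  rcases le_or_gt t N with h | h
  · have key : (N.choose t : Int) * ((N : Int) - (t : Int)) = (N.choose (t+1) : Int) * ((t : Int) + 1) := by
      have := Nat.choose_succ_right_eq N t
      have hsub : ((N - t : Nat) : Int) = (N : Int) - (t : Int) := by omega
      calc (N.choose t : Int) * ((N : Int) - (t : Int))
          = ((N.choose t * (N - t) : Nat) : Int) := by rw [Nat.cast_mul, hsub]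
        _ = ((N.choose (t+1) * (t+1) : Nat) : Int) := by rw [← this]
        _ = (N.choose (t+1) : Int) * ((t : Int) + 1) := by push_cast; ring
    rw [key, PySem.Int.floordiv_eq_ediv_of_pos (by positivity)]
    exact Int.mul_ediv_cancel _ (by positivity)
  · rw [Nat.choose_eq_zero_of_lt h, Nat.choose_eq_zero_of_lt (by omega)]
    simp

lemma bloop (N t : Nat) :
    (PySem.List.pyRange 0 (t : Int) 1).foldl
        (fun (p : Int × Int) k => (p.1 + p.2, PySem.Int.floordiv (p.2 * ((N : Int) - k)) (k + 1))) (0, 1)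
      = (∑ j ∈ Finset.range t, (N.choose j : Int), (N.choose t : Int)) := by
  induction t with
  | zero => simp [PySem.List.pyRange_one_eq_nil (le_refl 0)]
  | succ t ih =>
    have hcast : ((t + 1 : Nat) : Int) = (t : Int) + 1 := by push_cast; ring
    rw [hcast, PySem.List.pyRange_one_succ_right (by positivity), List.foldl_append, ih]
    simp only [List.foldl_cons, List.foldl_nil]
    rw [choose_step, Finset.sum_range_succ]

lemma aloop (N : Nat) (cap : Int) (hc : 0 ≤ cap) (t : Nat) :
    (PySem.List.pyRange 0 (t : Int) 1).foldl
        (fun count k => count + pycomb (N : Int) (min k cap)) 0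
      = ∑ j ∈ Finset.range t, (N.choose (min j cap.toNat) : Int) := by
  induction t with
  | zero => simp [PySem.List.pyRange_one_eq_nil (le_refl 0)]
  | succ t ih =>
    have hcast : ((t + 1 : Nat) : Int) = (t : Int) + 1 := by push_cast; ring
    rw [hcast, PySem.List.pyRange_one_succ_right (by positivity), List.foldl_append, ih]
    simp only [List.foldl_cons, List.foldl_nil]
    rw [Finset.sum_range_succ]
    congr 1
    have h1 : (0:Int) ≤ min (t:Int) cap := le_min (by positivity) hc
    have h2 : (min (t:Int) cap).toNat = min t cap.toNat := by omega
    have h0 : (0:Int) ≤ (N:Int) := by positivity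
    simp [pycomb, h0, h1, h2]

lemma asum_split (N capN t : Nat) :
    (∑ j ∈ Finset.range t, (N.choose (min j capN) : Int))
      = (∑ j ∈ Finset.range (min t capN), (N.choose j : Int))
        + ((t : Int) - (↑(min t capN) : Int)) * (N.choose (min t capN) : Int) := by
  induction t with
  | zero => simp
  | succ t ih =>
    rcases lt_or_ge t capN with h | h
    · have e1 : min t capN = t := by omega
      have e2 : min (t+1) capN = t + 1 := by omega
      rw [Finset.sum_range_succ, ih, e1, e2, Finset.sum_range_succ]
      push_cast; ring
    · have e1 : min t capN = capN := by omega
      have e2 : min (t+1) capN = capN := by omega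
      rw [Finset.sum_range_succ, ih, e1, e2]
      push_cast; ring

-- ===== VERDICT (by name: the statement is the Claim_ definition above) =====
theorem analytic_segmentations_spec : Claim_equal_analytic_segmentations := by
  intro n d hdom hpre
  obtain ⟨hd, hodd⟩ := hpre
  unfold Spec_analytic_segmentations analytic_segmentations analytic_segmentations_alt
  simp only []
  rcases le_or_gt 0 n with hpos | hneg
  · -- n ≥ 0 : the real computation
    obtain ⟨N, hn'⟩ : ∃ N : Nat, n = (N : Int) := ⟨n.toNat, by omega⟩
    have hmid0 : 0 ≤ PySem.Int.floordiv (n + 1) 2 := by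
      rw [PySem.Int.floordiv_eq_ediv_of_pos (by norm_num)]; omega
    obtain ⟨midN, hmid⟩ : ∃ m : Nat, PySem.Int.floordiv (n + 1) 2 = (m : Int) :=
      ⟨(PySem.Int.floordiv (n + 1) 2).toNat, by omega⟩
    obtain ⟨capN, hcap⟩ : ∃ c : Nat, d - 1 = (c : Int) := ⟨(d - 1).toNat, by omega⟩
    have hm : min (PySem.Int.floordiv (n + 1) 2) (d - 1) = ((min midN capN : Nat) : Int) := by
      rw [hmid, hcap]; simp [Nat.cast_min]
    rw [hm, hmid, hcap, hn', aloop N (capN : Int) (by positivity) midN, bloop]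
    simp only [Int.toNat_natCast]
    rw [asum_split N capN midN]
    have hcomb : pycomb (N : Int) ((min midN capN : Nat) : Int) = (N.choose (min midN capN) : Int) := by
      simp only [pycomb]
      rw [if_pos ⟨by positivity, by positivity⟩]
      congr 1
    rw [hcomb]
    rcases le_or_gt midN capN with hle | hgt
    · have e : min midN capN = midN := by omega
      have hif : ¬ ((midN : Int) > (capN : Int)) := by omega
      rw [e, if_neg hif]
      split_ifs <;> ring
    · have e : min midN capN = capN := by omega
      have hif : ((midN : Int) > (capN : Int)) := by omega
      rw [e, if_pos hif]
  · -- n < 0 : n is odd (Pre_), both loops are empty and both results are 0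
    have hodd' : n % 2 = 1 := by rcases hodd with h | h; omega; exact h
    have hmid : PySem.Int.floordiv (n + 1) 2 ≤ 0 := by
      rw [PySem.Int.floordiv_eq_ediv_of_pos (by norm_num)]; omega
    have hmod : PySem.Int.mod n 2 = 1 := by
      rw [PySem.Int.mod_eq_emod_of_pos (by norm_num)]; exact hodd'
    rw [PySem.List.pyRange_one_eq_nil hmid,
        PySem.List.pyRange_one_eq_nil (le_trans (min_le_left _ _) hmid), hmod]
    simp
    omega
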